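-- pv_equiv track=rewrite | github.com/pypi-data/pypi-mirror-145 | packages/luanspaceship/luanspaceship-1.0.2-py3-none-any.whl/LuanSpaceship/DrawSpaceship.py | drawMidTopSpaceship
-- ===== SOURCE A (Python) =====
-- def drawMidTopSpaceship(length):
--     midtop_spaceship = ''
--
--     for j in range(0, length):
--
--         midtop_spaceship += ' ' * length
--         midtop_spaceship += '|'
--
--         if j == length-1:
--             midtop_spaceship += '_' * (2*length - 1)
--         else:
--             midtop_spaceship += ' ' * (2*length - 1)
--
--         midtop_spaceship += '|'
--         midtop_spaceship += ' ' * length + '\n'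
--
--
--     return midtop_spaceship
-- ===== SOURCE B (Python) =====
-- def drawMidTopSpaceship(length):
--     if length <= 0:
--         return ''
--     def row(mid):
--         return ''.join(
--             '|' if c == length or c == 3 * length
--             else mid if length < c < 3 * length
--             else ' '
--             for c in range(4 * length + 1)) + '\n'
--     return row(' ') * (length - 1) + row('_')
-- ===== Notes on version B (the rewrite author's own statement) =====
-- stated objective: alternative
-- what changed: Replaces A's row-accumulating loop with its per-row j==length-1 branch by a column-coordinate formula: each row is computed once by deciding every character from its column index, and the result is row(' ')*(length-1) + row('_') via string multiplication, with an explicit '' guard for length <= 0.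
import Mathlib
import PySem

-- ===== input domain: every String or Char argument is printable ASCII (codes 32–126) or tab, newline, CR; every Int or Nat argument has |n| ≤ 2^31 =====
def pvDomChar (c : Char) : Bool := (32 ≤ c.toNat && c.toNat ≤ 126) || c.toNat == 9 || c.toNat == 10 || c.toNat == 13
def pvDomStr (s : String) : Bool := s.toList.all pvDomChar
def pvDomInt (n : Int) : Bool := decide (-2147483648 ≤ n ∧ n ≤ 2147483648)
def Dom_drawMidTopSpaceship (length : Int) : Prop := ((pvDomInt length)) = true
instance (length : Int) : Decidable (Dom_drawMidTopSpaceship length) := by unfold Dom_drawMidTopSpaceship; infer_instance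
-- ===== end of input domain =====

-- B replaces A's row-accumulating loop (with its per-row branch and piecewise string
-- repetitions) by a column-coordinate formula deciding each character of a row, built once
-- per row kind and repeated by string multiplication. Objective: alternative.

-- ===== PORT A =====
-- A's loop body as a function of j (the '+=' chain of one iteration), over List Char.
def pvRowA (length : Int) (j : Int) : List Char :=
  PySem.List.pyRepeat [' '] length ++ ['|'] ++
    (if j = length - 1 then PySem.List.pyRepeat ['_'] (2 * length - 1)
     else PySem.List.pyRepeat [' '] (2 * length - 1)) ++
    ['|'] ++ (PySem.List.pyRepeat [' '] length ++ ['\n'])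

def drawMidTopSpaceship (length : Int) : String :=
  String.ofList ((PySem.List.pyRange 0 length).foldl (fun acc j => acc ++ pvRowA length j) [])

-- ===== PORT B =====
-- the character at column c of a row whose middle character is mid
def pvCell (length c : Int) (mid : Char) : Char :=
  if c = length ∨ c = 3 * length then '|'
  else if length < c ∧ c < 3 * length then mid
  else ' '

-- row(mid): join of cell over all columns, plus the newline
def pvRowB (length : Int) (mid : Char) : List Char :=
  ((PySem.List.pyRange 0 (4 * length + 1)).map (fun c => pvCell length c mid)) ++ ['\n']

def drawMidTopSpaceship_alt (length : Int) : String :=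
  if length ≤ 0 then ""
  else String.ofList (PySem.List.pyRepeat (pvRowB length ' ') (length - 1) ++ pvRowB length '_')

-- ===== PRECONDITION & SPEC =====
def Spec_drawMidTopSpaceship (length : Int) (out : String) : Prop := out = drawMidTopSpaceship_alt length
instance (length : Int) (out : String) : Decidable (Spec_drawMidTopSpaceship length out) := by unfold Spec_drawMidTopSpaceship; infer_instance

-- ===== CLAIM =====
def Claim_equal_drawMidTopSpaceship : Prop := ∀ (length : Int), Dom_drawMidTopSpaceship length → Spec_drawMidTopSpaceship length (drawMidTopSpaceship length)

-- ===== LEMMAS AND PROOFS =====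

theorem map_range_split (f : Nat → Char) (a b : Nat) :
    (List.range (a + b)).map f = (List.range a).map f ++ (List.range b).map (fun k => f (a + k)) := by
  rw [List.range_add, List.map_append, List.map_map]
  rfl

theorem map_const_range (f : Nat → Char) (k : Nat) (c : Char) (h : ∀ i < k, f i = c) :
    (List.range k).map f = List.replicate k c := by
  rw [List.map_congr_left (g := fun _ => c) (fun i hi => h i (List.mem_range.mp hi))]
  simp [List.map_const']

-- characterization of B's row: the column map splits into five constant segments
theorem pvRowB_eq (n : Nat) (mid : Char) :
    pvRowB ((n : Int) + 1) mid =
      List.replicate (n + 1) ' ' ++ ['|'] ++ List.replicate (2 * n + 1) mid ++ ['|'] ++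
        (List.replicate (n + 1) ' ' ++ ['\n']) := by
  unfold pvRowB
  have hcast : (4 * ((n : Int) + 1) + 1) = ((4 * n + 5 : Nat) : Int) := by push_cast; ring
  rw [hcast, PySem.List.pyRange_zero_natCast, List.map_map]
  rw [show 4 * n + 5 = (n + 1) + (1 + ((2 * n + 1) + (1 + (n + 1)))) from by omega]
  rw [map_range_split _ (n + 1) (1 + ((2 * n + 1) + (1 + (n + 1)))),
      map_range_split _ 1 ((2 * n + 1) + (1 + (n + 1))),
      map_range_split _ (2 * n + 1) (1 + (n + 1)),
      map_range_split _ 1 (n + 1)]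
  have c0 : (List.range (n + 1)).map ((fun c => pvCell ((n : Int) + 1) c mid) ∘ fun k : Nat => (k : Int))
      = List.replicate (n + 1) ' ' := by
    apply map_const_range; intro i hi
    simp only [Function.comp, pvCell]
    rw [if_neg (by omega), if_neg (by omega)]
  have c1 : (List.range 1).map (fun k => ((fun c => pvCell ((n : Int) + 1) c mid) ∘ fun k : Nat => (k : Int)) ((n + 1) + k))
      = ['|'] := by
    apply map_const_range; intro i hi
    simp only [Function.comp, pvCell]
    rw [if_pos (by left; push_cast; omega)]
  have c2 : (List.range (2 * n + 1)).map (fun k => ((fun c => pvCell ((n : Int) + 1) c mid) ∘ fun k : Nat => (k : Int)) ((n + 1) + (1 + k)))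
      = List.replicate (2 * n + 1) mid := by
    apply map_const_range; intro i hi
    simp only [Function.comp, pvCell]
    rw [if_neg (by push_cast; omega), if_pos (by push_cast; omega)]
  have c3 : (List.range 1).map (fun k => ((fun c => pvCell ((n : Int) + 1) c mid) ∘ fun k : Nat => (k : Int)) ((n + 1) + (1 + ((2 * n + 1) + k))))
      = ['|'] := by
    apply map_const_range; intro i hi
    simp only [Function.comp, pvCell]
    rw [if_pos (by right; push_cast; omega)]
  have c4 : (List.range (n + 1)).map (fun k => ((fun c => pvCell ((n : Int) + 1) c mid) ∘ fun k : Nat => (k : Int)) ((n + 1) + (1 + ((2 * n + 1) + (1 + k)))))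
      = List.replicate (n + 1) ' ' := by
    apply map_const_range; intro i hi
    simp only [Function.comp, pvCell]
    rw [if_neg (by push_cast; omega), if_neg (by push_cast; omega)]
  rw [c0, c1, c2, c3, c4]
  simp [List.append_assoc]

theorem pvRowA_ne (n : Nat) (j : Int) (h : j ≠ (n : Int) + 1 - 1) :
    pvRowA ((n : Int) + 1) j = pvRowB ((n : Int) + 1) ' ' := by
  rw [pvRowB_eq]
  simp only [pvRowA, PySem.List.pyRepeat_singleton, if_neg h]
  have h1 : (((n : Int) + 1)).toNat = n + 1 := by omega
  have h2 : ((2 * ((n : Int) + 1) - 1)).toNat = 2 * n + 1 := by omega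
  rw [h1, h2]

theorem pvRowA_last (n : Nat) (j : Int) (h : j = (n : Int) + 1 - 1) :
    pvRowA ((n : Int) + 1) j = pvRowB ((n : Int) + 1) '_' := by
  rw [pvRowB_eq]
  simp only [pvRowA, PySem.List.pyRepeat_singleton, if_pos h]
  have h1 : (((n : Int) + 1)).toNat = n + 1 := by omega
  have h2 : ((2 * ((n : Int) + 1) - 1)).toNat = 2 * n + 1 := by omega
  rw [h1, h2]

theorem pvRange_flatMap (n : Nat) :
    List.flatMap (pvRowA ((n : Int) + 1)) (PySem.List.pyRange 0 (n : Int)) =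
      (List.replicate n (pvRowB ((n : Int) + 1) ' ')).flatten := by
  rw [PySem.List.pyRange_zero_natCast, List.flatMap, List.map_map]
  rw [List.map_congr_left (f := pvRowA ((n : Int) + 1) ∘ fun k : Nat => (k : Int))
      (g := fun _ => pvRowB ((n : Int) + 1) ' ')]
  · simp [List.map_const']
  · intro k hk
    have hk' : k < n := List.mem_range.mp hk
    simpa using pvRowA_ne n (k : Int) (by omega)

theorem drawMidTopSpaceship_spec : Claim_equal_drawMidTopSpaceship := by
  intro length _
  unfold Spec_drawMidTopSpaceship drawMidTopSpaceship drawMidTopSpaceship_alt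
  rw [PySem.List.foldl_append_eq_flatMap]
  by_cases h : length ≤ 0
  · have hr : PySem.List.pyRange 0 length = [] := by
      apply List.eq_nil_iff_forall_not_mem.mpr
      intro x hx
      have := PySem.List.mem_pyRange_one.mp hx
      omega
    simp [hr, h]
  · obtain ⟨n, hn⟩ : ∃ n : Nat, length = (n : Int) + 1 := ⟨(length - 1).toNat, by omega⟩
    subst hn
    have hstep : PySem.List.pyRange 0 ((n : Int) + 1) = PySem.List.pyRange 0 (n : Int) ++ [(n : Int)] := by
      exact PySem.List.pyRange_one_succ_right (by omega)
    rw [hstep, List.flatMap_append, if_neg h]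
    simp only [List.flatMap_cons, List.flatMap_nil, List.append_nil]
    rw [pvRange_flatMap n, pvRowA_last n (n : Int) (by omega)]
    simp [PySem.List.pyRepeat]
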